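-- pv_equiv track=rewrite | github.com/elenasasso/Jaspar-Web-service | JASPAR_WEB_SERVICE.py | dna_sequences_from_protein
-- ===== SOURCE A (Python) =====
-- def dna_sequences_from_protein(protein_sequence, gencode):
--     dna_sequences = []
--
--     for amino_acid in protein_sequence:
--         if amino_acid in gencode:
--             dna_sequences.append(gencode[amino_acid])
--
--     # generate all the possible sequences
--     from itertools import product
--     possible_dna_sequences = [''.join(seq) for seq in product(*dna_sequences)]
--
--     return possible_dna_sequences
-- ===== SOURCE B (Python) =====
-- def dna_sequences_from_protein(protein_sequence, gencode):
--     # Iterative Cartesian-product accumulation instead of itertools.product: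
--     # one fused pass over the protein, extending every partial sequence by each codon.
--     result = ['']
--     for amino_acid in protein_sequence:
--         if amino_acid in gencode:
--             codons = gencode[amino_acid]
--             result = [prefix + codon for prefix in result for codon in codons]
--     return result
-- ===== Notes on version B (the rewrite author's own statement) =====
-- stated objective: simpler
-- what changed: Replaces the collect-lists-then-itertools.product-then-join pipeline with a single fused pass that accumulates the partial DNA strings directly (result = [prefix+codon ...]), preserving product's ordering and the [''] empty case.
import Mathlib
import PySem

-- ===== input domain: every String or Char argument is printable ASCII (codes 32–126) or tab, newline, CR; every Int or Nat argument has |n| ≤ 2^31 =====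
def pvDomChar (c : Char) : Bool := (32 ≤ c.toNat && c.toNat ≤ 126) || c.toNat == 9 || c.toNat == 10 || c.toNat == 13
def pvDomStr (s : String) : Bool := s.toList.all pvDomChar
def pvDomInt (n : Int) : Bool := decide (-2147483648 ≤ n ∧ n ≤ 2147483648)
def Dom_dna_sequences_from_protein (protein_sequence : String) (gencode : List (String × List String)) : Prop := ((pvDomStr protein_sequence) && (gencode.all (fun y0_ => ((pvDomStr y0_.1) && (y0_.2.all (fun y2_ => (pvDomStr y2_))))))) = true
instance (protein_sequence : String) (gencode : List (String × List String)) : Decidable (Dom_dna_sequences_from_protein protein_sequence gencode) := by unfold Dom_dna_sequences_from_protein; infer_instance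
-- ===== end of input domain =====

-- B replaces the collect-then-itertools.product-then-join pipeline by one fused pass that
-- accumulates the partial DNA strings directly (objective: simpler; same asymptotic cost).

-- 'amino_acid in gencode' / 'gencode[amino_acid]' for a one-character string key (first match)
def pvLookup (gencode : List (String × List String)) (c : Char) : Option (List String) :=
  gencode.lookup (String.ofList [c])

-- ===== PORT A =====
-- itertools.product(*lists): leftmost position varies slowest
def pvProduct : List (List String) → List (List String)
  | [] => [[]]
  | l :: rest => l.flatMap (fun x => (pvProduct rest).map (fun t => x :: t))

def dna_sequences_from_protein (protein_sequence : String) (gencode : List (String × List String)) : List String :=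
  let dna_sequences := protein_sequence.toList.foldl
    (fun acc c => match pvLookup gencode c with
      | some codons => acc ++ [codons]
      | none => acc) ([] : List (List String))
  (pvProduct dna_sequences).map (fun seq => PySem.Str.join "" seq)

-- ===== PORT B =====
def dna_sequences_from_protein_alt (protein_sequence : String) (gencode : List (String × List String)) : List String :=
  protein_sequence.toList.foldl
    (fun result c => match pvLookup gencode c with
      | some codons => result.flatMap (fun pre => codons.map (fun codon => pre ++ codon))
      | none => result) [""]

-- ===== PRECONDITION & SPEC =====
def Spec_dna_sequences_from_protein (protein_sequence : String) (gencode : List (String × List String)) (out : List String) : Prop := out = dna_sequences_from_protein_alt protein_sequence gencode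
instance (protein_sequence : String) (gencode : List (String × List String)) (out : List String) : Decidable (Spec_dna_sequences_from_protein protein_sequence gencode out) := by unfold Spec_dna_sequences_from_protein; infer_instance

-- ===== CLAIM (what is proved, stated in full; the proofs are below) =====
def Claim_equal_dna_sequences_from_protein : Prop := ∀ (protein_sequence : String) (gencode : List (String × List String)), Dom_dna_sequences_from_protein protein_sequence gencode → Spec_dna_sequences_from_protein protein_sequence gencode (dna_sequences_from_protein protein_sequence gencode)

-- ===== LEMMAS AND PROOFS =====

-- B's extension step, named for the proofs
def pvStep (result : List String) (codons : List String) : List String :=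
  result.flatMap (fun pre => codons.map (fun codon => pre ++ codon))

lemma pvChars_join_nil_cons (x : List Char) (l : List (List Char)) :
    PySem.Chars.join [] (x :: l) = x ++ PySem.Chars.join [] l := by
  induction l with
  | nil => simp [PySem.Chars.join, List.intercalate]
  | cons h t ih => simp [PySem.Chars.join, List.intercalate, List.intersperse] at *

lemma pvStr_join_nil_cons (x : String) (l : List String) :
    PySem.Str.join "" (x :: l) = x ++ PySem.Str.join "" l := by
  apply String.toList_injective
  simp [PySem.Str.join, pvChars_join_nil_cons]

lemma pvStr_join_nil_nil : PySem.Str.join "" ([] : List String) = "" := by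
  simp [PySem.Str.join]

-- A's collection loop is filterMap
lemma pvFoldl_collect (f : Char → Option (List String)) :
    ∀ (cs : List Char) (acc : List (List String)),
      cs.foldl (fun a c => match f c with | some v => a ++ [v] | none => a) acc
        = acc ++ cs.filterMap f := by
  intro cs
  induction cs with
  | nil => simp
  | cons c cs ih =>
    intro acc
    cases h : f c <;> simp [List.foldl_cons, h, ih]

-- B's fused loop is the collected list folded with pvStep
lemma pvFoldl_fuse (f : Char → Option (List String)) :
    ∀ (cs : List Char) (init : List String),
      cs.foldl (fun r c => match f c with
        | some v => r.flatMap (fun pre => v.map (fun codon => pre ++ codon))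
        | none => r) init
        = (cs.filterMap f).foldl pvStep init := by
  intro cs
  induction cs with
  | nil => simp
  | cons c cs ih =>
    intro init
    cases h : f c <;> simp [List.foldl_cons, h, ih, pvStep]

-- folding pvStep computes every prefix extended by a joined product tuple
lemma pvFoldl_step_product :
    ∀ (L : List (List String)) (acc : List String),
      L.foldl pvStep acc
        = acc.flatMap (fun pre => ((pvProduct L).map (PySem.Str.join "")).map (fun t => pre ++ t)) := by
  intro L
  induction L with
  | nil =>
    intro acc
    simp [pvProduct, pvStr_join_nil_nil]
  | cons l L ih =>
    intro acc
    simp only [List.foldl_cons, ih, pvProduct, pvStep]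
    simp [List.flatMap_map, List.map_flatMap, List.flatMap_assoc, Function.comp_def,
      pvStr_join_nil_cons, String.append_assoc]

-- ===== VERDICT (by name: the statement is the Claim_ definition above) =====
theorem dna_sequences_from_protein_spec : Claim_equal_dna_sequences_from_protein := by
  intro p g _
  unfold Spec_dna_sequences_from_protein dna_sequences_from_protein dna_sequences_from_protein_alt
  rw [pvFoldl_fuse (pvLookup g) p.toList [""], pvFoldl_step_product]
  have hA := pvFoldl_collect (pvLookup g) p.toList []
  simp only [List.nil_append] at hA
  simp [hA]
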